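-- pv_equiv track=rewrite | github.com/kelaplicativos-rgb/ia-planilhas | bling_app_zero/core/site_crawler_shared.py | eh_link_ruim
-- ===== SOURCE A (Python) =====
-- def eh_link_ruim(url: str) -> bool:
--     try:
--         u = str(url or "").strip().lower()
--         if not u:
--             return True
--
--         bloqueados = [
--             "#",
--             "/cart",
--             "/carrinho",
--             "/checkout",
--             "/login",
--             "/entrar",
--             "/conta",
--             "/account",
--             "/register",
--             "/cadastro",
--             "/favoritos",
--             "/wishlist",
--             "/politica",
--             "/privacy",
--             "/termos",
--             "/terms",
--             "/atendimento",
--             "/contato",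
--             "/contact",
--             "/blog",
--             "/noticia",
--             "/news",
--             "/pagina/",
--             "?page=",
--             "&page=",
--             "?pagina=",
--             "&pagina=",
--             "/categoria/",
--             "/category/",
--             "/collections/",
--             "/search",
--             "/busca",
--             "whatsapp",
--             "instagram",
--             "facebook",
--             "youtube",
--         ]
--         return any(item in u for item in bloqueados)
--     except Exception:
--         return True
-- ===== SOURCE B (Python) =====
-- # Position-major scan with a first-character index: the URL is walked once and at each
-- # position only the blocked patterns starting with that character are tested.
-- _PATTERNS = ("# /cart /carrinho /checkout /login /entrar /conta /account "
--              "/register /cadastro /favoritos /wishlist /politica /privacy "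
--              "/termos /terms /atendimento /contato /contact /blog /noticia "
--              "/news /pagina/ ?page= &page= ?pagina= &pagina= /categoria/ "
--              "/category/ /collections/ /search /busca whatsapp instagram "
--              "facebook youtube").split()
--
-- _INDEX = {}
-- for _p in _PATTERNS:
--     _INDEX.setdefault(_p[0], []).append(_p)
--
-- def eh_link_ruim(url: str) -> bool:
--     try:
--         u = str(url or "").strip().lower()
--         if not u:
--             return True
--         for i, ch in enumerate(u):
--             for p in _INDEX.get(ch, ()):
--                 if u.startswith(p, i):
--                     return True
--         return False
--     except Exception:
--         return True
-- ===== Notes on version B (the rewrite author's own statement) =====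
-- stated objective: alternative
-- what changed: A asks pattern by pattern whether each blocked substring occurs anywhere in the URL (36 independent 'in' scans); B builds once a first-character index (dict from char to the patterns starting with it) and walks the URL a single time, at each position testing only the indexed candidates for that character, so the traversal is position-major over one hash index instead of pattern-major.
import Mathlib
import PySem

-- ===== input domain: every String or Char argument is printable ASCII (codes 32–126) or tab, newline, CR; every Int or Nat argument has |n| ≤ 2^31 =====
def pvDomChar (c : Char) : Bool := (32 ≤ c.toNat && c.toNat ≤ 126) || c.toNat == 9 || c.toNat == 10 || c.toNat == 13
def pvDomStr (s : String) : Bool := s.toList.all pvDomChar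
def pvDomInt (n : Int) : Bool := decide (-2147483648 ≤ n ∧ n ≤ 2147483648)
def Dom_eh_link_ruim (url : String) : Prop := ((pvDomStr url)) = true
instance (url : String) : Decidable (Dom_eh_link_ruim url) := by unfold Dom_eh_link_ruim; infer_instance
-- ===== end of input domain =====

-- B replaces A's pattern-major 'any(item in u)' scans by one position-major walk of the URL
-- using a first-character index of the blocked patterns (alternative data structure; return value only).


-- ===== PORT A =====
-- A's in-function blocked list, item by item
def pvBloqueados : List String :=
  ["#", "/cart", "/carrinho", "/checkout", "/login", "/entrar", "/conta",
   "/account", "/register", "/cadastro", "/favoritos", "/wishlist",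
   "/politica", "/privacy", "/termos", "/terms", "/atendimento", "/contato",
   "/contact", "/blog", "/noticia", "/news", "/pagina/", "?page=", "&page=",
   "?pagina=", "&pagina=", "/categoria/", "/category/", "/collections/",
   "/search", "/busca", "whatsapp", "instagram", "facebook", "youtube"]

-- any(item in u for item in bloqueados): one 'in' (substring) scan per pattern
def eh_link_ruim (url : String) : Bool :=
  let u := PySem.Str.lower (PySem.Str.strip url)
  if PySem.Str.len u = 0 then true
  else pvBloqueados.any (fun item => PySem.Str.isIn item u)

-- ===== PORT B =====
-- Source B's module-level data: one space-separated string, split once at import time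
def pvBlockedRaw : String :=
  "# /cart /carrinho /checkout /login /entrar /conta /account /register /cadastro /favoritos /wishlist /politica /privacy /termos /terms /atendimento /contato /contact /blog /noticia /news /pagina/ ?page= &page= ?pagina= &pagina= /categoria/ /category/ /collections/ /search /busca whatsapp instagram facebook youtube"

def pvPatterns : List (List Char) := (PySem.Str.split₀ pvBlockedRaw).map String.toList

-- _INDEX.setdefault(p[0], []).append(p): append p to the bucket of its first char
def pvIdxAdd (idx : List (Char × List (List Char))) (c : Char) (p : List Char) :
    List (Char × List (List Char)) :=
  match idx with
  | [] => [(c, [p])]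
  | (k, v) :: rest => if k = c then (k, v ++ [p]) :: rest else (k, v) :: pvIdxAdd rest c p

def pvIdxStep (idx : List (Char × List (List Char))) (p : List Char) :
    List (Char × List (List Char)) :=
  match p with
  | [] => idx
  | c :: _ => pvIdxAdd idx c p

def pvIndex : List (Char × List (List Char)) := pvPatterns.foldl pvIdxStep []

-- the position loop: at each suffix look up the current char's bucket and test its patterns
def pvScanB (u : List Char) : Bool :=
  match u with
  | [] => false
  | c :: rest =>
    if ((pvIndex.lookup c).getD []).any (fun p => p.isPrefixOf (c :: rest)) then true
    else pvScanB rest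

def eh_link_ruim_alt (url : String) : Bool :=
  let u := (PySem.Str.lower (PySem.Str.strip url)).toList
  if u.isEmpty then true
  else pvScanB u

-- ===== PRECONDITION & SPEC =====
def Spec_eh_link_ruim (url : String) (out : Bool) : Prop := out = eh_link_ruim_alt url
instance (url : String) (out : Bool) : Decidable (Spec_eh_link_ruim url out) := by unfold Spec_eh_link_ruim; infer_instance

-- ===== CLAIM (what is proved, stated in full; the proofs are below) =====
def Claim_equal_eh_link_ruim : Prop := ∀ (url : String), Dom_eh_link_ruim url → Spec_eh_link_ruim url (eh_link_ruim url)

-- ===== LEMMAS AND PROOFS =====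

-- bucket of c after one pvIdxAdd
lemma lookup_pvIdxAdd (idx : List (Char × List (List Char))) (c : Char) (p : List Char)
    (c' : Char) :
    (((pvIdxAdd idx c p).lookup c').getD []) =
      if c' = c then ((idx.lookup c').getD []) ++ [p] else (idx.lookup c').getD [] := by
  induction idx with
  | nil =>
    simp only [pvIdxAdd, List.lookup]
    by_cases h : c' = c
    · subst h; simp
    · have hb : (c' == c) = false := beq_eq_false_iff_ne.mpr h
      simp [hb, h]
  | cons kv rest ih =>
    obtain ⟨k, v⟩ := kv
    simp only [pvIdxAdd]
    by_cases hk : k = c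
    · subst hk
      by_cases h : c' = k
      · subst h; simp [List.lookup]
      · have hb : (c' == k) = false := beq_eq_false_iff_ne.mpr h
        simp [List.lookup, hb, h]
    · rw [if_neg hk]
      by_cases h : c' = k
      · subst h
        simp [List.lookup, hk]
      · have hb : (c' == k) = false := beq_eq_false_iff_ne.mpr h
        simp [List.lookup, hb, ih]

-- membership in a bucket of the built index
lemma mem_build (ps : List (List Char)) (idx : List (Char × List (List Char)))
    (c : Char) (p : List Char) :
    p ∈ (((ps.foldl pvIdxStep idx).lookup c).getD []) ↔
      p ∈ ((idx.lookup c).getD []) ∨ (p ∈ ps ∧ p.head? = some c) := by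
  induction ps generalizing idx with
  | nil => simp
  | cons q qs ih =>
    simp only [List.foldl_cons, ih, List.mem_cons]
    cases q with
    | nil =>
      simp only [pvIdxStep]
      constructor
      · rintro (h1 | h2)
        · exact .inl h1
        · exact .inr ⟨.inr h2.1, h2.2⟩
      · rintro (h1 | ⟨(rfl | hm), hh⟩)
        · exact .inl h1
        · simp at hh
        · exact .inr ⟨hm, hh⟩
    | cons d ds =>
      simp only [pvIdxStep]
      rw [lookup_pvIdxAdd]
      by_cases h : c = d
      · subst h
        rw [if_pos rfl]
        simp only [List.mem_append, List.mem_singleton]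
        constructor
        · rintro ((h1 | rfl) | h2)
          · exact .inl h1
          · exact .inr ⟨.inl rfl, rfl⟩
          · exact .inr ⟨.inr h2.1, h2.2⟩
        · rintro (h1 | ⟨(rfl | hm), hh⟩)
          · exact .inl (.inl h1)
          · exact .inl (.inr rfl)
          · exact .inr ⟨hm, hh⟩
      · rw [if_neg h]
        constructor
        · rintro (h1 | h2)
          · exact .inl h1
          · exact .inr ⟨.inr h2.1, h2.2⟩
        · rintro (h1 | ⟨(rfl | hm), hh⟩)
          · exact .inl h1
          · exact absurd (Option.some.inj hh) (fun e => h e.symm)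
          · exact .inr ⟨hm, hh⟩

lemma mem_pvIndex (c : Char) (p : List Char) :
    p ∈ ((pvIndex.lookup c).getD []) ↔ p ∈ pvPatterns ∧ p.head? = some c := by
  rw [pvIndex, mem_build]; simp

set_option maxRecDepth 4000 in
lemma pvPatterns_ne_nil : ∀ p ∈ pvPatterns, p ≠ [] := by decide

-- at a given position, the bucket check equals the full-pattern check
lemma cands_eq (c : Char) (rest : List Char) :
    ((pvIndex.lookup c).getD []).any (fun p => p.isPrefixOf (c :: rest)) =
      pvPatterns.any (fun p => p.isPrefixOf (c :: rest)) := by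
  apply Bool.eq_iff_iff.mpr
  simp only [List.any_eq_true]
  constructor
  · rintro ⟨q, hq, hpre⟩
    exact ⟨q, ((mem_pvIndex c q).mp hq).1, hpre⟩
  · rintro ⟨q, hq, hpre⟩
    replace hpre : q.isPrefixOf (c :: rest) = true := hpre
    refine ⟨q, (mem_pvIndex c q).mpr ⟨hq, ?_⟩, hpre⟩
    rcases q with _ | ⟨d, ds⟩
    · exact absurd rfl (pvPatterns_ne_nil [] hq)
    · rcases List.isPrefixOf_iff_prefix.mp hpre with ⟨t, ht⟩
      simp only [List.cons_append] at ht
      injection ht with h1 _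
      simp [h1]

lemma pvScanB_iff (L : List Char) :
    pvScanB L = true ↔ ∃ q ∈ pvPatterns, q <:+: L := by
  induction L with
  | nil =>
    rw [pvScanB]
    constructor
    · intro h; exact absurd h (by simp)
    · rintro ⟨q, hq, h⟩
      exact absurd (List.eq_nil_of_infix_nil h) (pvPatterns_ne_nil q hq)
  | cons c rest ih =>
    rw [pvScanB, cands_eq]
    by_cases h : pvPatterns.any (fun p => p.isPrefixOf (c :: rest)) = true
    · rw [if_pos h]
      simp only [true_iff]
      rcases List.any_eq_true.mp h with ⟨q, hq, hpre⟩
      replace hpre : q.isPrefixOf (c :: rest) = true := hpre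
      exact ⟨q, hq, (List.isPrefixOf_iff_prefix.mp hpre).isInfix⟩
    · rw [if_neg h, ih]
      constructor
      · rintro ⟨q, hq, hi⟩; exact ⟨q, hq, List.infix_cons hi⟩
      · rintro ⟨q, hq, hi⟩
        rcases List.infix_cons_iff.mp hi with hpre | hinf
        · have hc : pvPatterns.any (fun p => p.isPrefixOf (c :: rest)) = true :=
            List.any_eq_true.mpr ⟨q, hq, List.isPrefixOf_iff_prefix.mpr hpre⟩
          exact absurd hc h
        · exact ⟨q, hq, hinf⟩

set_option maxRecDepth 4000 in
lemma pvPatterns_eq : pvPatterns = pvBloqueados.map String.toList := by decide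

lemma pvAny_eq_scanB (L : List Char) :
    pvBloqueados.any (fun item => PySem.Chars.isIn item.toList L) = pvScanB L := by
  apply Bool.eq_iff_iff.mpr
  rw [List.any_eq_true, pvScanB_iff, pvPatterns_eq]
  constructor
  · rintro ⟨b, hb, hi⟩
    exact ⟨b.toList, List.mem_map_of_mem hb, (PySem.Chars.isIn_iff_infix _ _).mp hi⟩
  · rintro ⟨q, hq, hi⟩
    rcases List.mem_map.mp hq with ⟨b, hb, rfl⟩
    exact ⟨b, hb, (PySem.Chars.isIn_iff_infix _ _).mpr hi⟩

-- ===== VERDICT (by name: the statement is the Claim_ definition above) =====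
theorem eh_link_ruim_spec : Claim_equal_eh_link_ruim := by
  intro url _
  unfold Spec_eh_link_ruim eh_link_ruim eh_link_ruim_alt
  simp only [PySem.Str.len_eq, List.isEmpty_iff, Nat.cast_eq_zero, List.length_eq_zero_iff]
  split_ifs with h
  · rfl
  · rw [← pvAny_eq_scanB]
    simp [pysem]
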